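-- pv_equiv track=rewrite | github.com/boyland-pf/MARS-Dataset | convert_script.py | clean_table
-- ===== SOURCE A (Python) =====
-- def isnonstring(s):
-- 	try:
-- 		int(s)
-- 		return True
-- 	except:
-- 		try:
-- 			float(s)
-- 			return True
-- 		except:
-- 			return False
--
-- def addheader(t):
-- 	if any([isnonstring(s) for s in t[0]]):
-- 		t = [(["c"+str(x) for x in range(len(t[0]))])] + t
-- 	return t
--
-- def clean_table(t):
-- 	t = addheader(t)
-- 	res = []
-- 	idxstolose = []
-- 	for i in range(len(t[0])):
-- 		if all([x[i]==t[1][i] for x in t[1:]]):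
-- 			idxstolose.append(i)
-- 		if all([str(x[i])==str(j) for j,x in enumerate(t[1:])]):
-- 			idxstolose.append(i)
-- 		if all([str(x[i])==str(j+1) for j,x in enumerate(t[1:])]):
-- 			idxstolose.append(i)
-- 		if all([str(x[i])==str(j) for j,x in enumerate(t)]):
-- 			idxstolose.append(i)
-- 	for line in t:
-- 		lineres = []
-- 		for (i,x) in enumerate(line):
-- 			if i not in idxstolose:
-- 				lineres.append(x)
-- 		res.append(lineres)
-- 	res = addheader(res)
-- 	return res
-- ===== SOURCE B (Python) =====
-- def isnonstring(s):
-- 	try: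
-- 		int(s)
-- 		return True
-- 	except:
-- 		try:
-- 			float(s)
-- 			return True
-- 		except:
-- 			return False
--
-- def addheader(t):
-- 	if any([isnonstring(s) for s in t[0]]):
-- 		t = [(["c"+str(x) for x in range(len(t[0]))])] + t
-- 	return t
--
-- def clean_table(t):
-- 	t = addheader(t)
-- 	n = len(t[0])
-- 	# one streaming pass over the rows, maintaining four per-column boolean flags:
-- 	# const (equal to the previous data row), eq_j, eq_j1 (data rows spell 0,1,.. / 1,2,..),
-- 	# eq_all (all rows incl. header spell 0,1,..)
-- 	const = [True] * n
-- 	eq_j = [True] * n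
-- 	eq_j1 = [True] * n
-- 	eq_all = [True] * n
-- 	prev = None
-- 	for j, row in enumerate(t):
-- 		cells = [row[i] for i in range(n)]
-- 		eq_all = [b and c == str(j) for b, c in zip(eq_all, cells)]
-- 		if j >= 1:
-- 			eq_j = [b and c == str(j - 1) for b, c in zip(eq_j, cells)]
-- 			eq_j1 = [b and c == str(j) for b, c in zip(eq_j1, cells)]
-- 			if j >= 2:
-- 				const = [b and c == p for (b, c), p in zip(zip(const, cells), prev)]
-- 			prev = cells
-- 	keep = [not (c or a or b or d) for c, a, b, d in zip(const, eq_j, eq_j1, eq_all)]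
-- 	res = [[x for i, x in enumerate(row) if i >= n or keep[i]] for row in t]
-- 	return addheader(res)
-- ===== Notes on version B (the rewrite author's own statement) =====
-- stated objective: faster
-- what changed: A makes four separate full scans over the rows for every column index and then filters each row with a linear 'i not in idxstolose' membership test; B makes ONE streaming row-major pass that updates four per-column boolean flag vectors as each row arrives (the constant test becomes a previous-row chain comparison instead of comparisons against t[1]), then rebuilds rows from the resulting keep mask, removing both the repeated scans and the membership test.
-- outside the precondition, e.g. on clean_table([]): A raises IndexError, B raises IndexError; on clean_table([['a', 'b'], ['x']]): A raises IndexError, B raises IndexError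
import Mathlib
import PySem

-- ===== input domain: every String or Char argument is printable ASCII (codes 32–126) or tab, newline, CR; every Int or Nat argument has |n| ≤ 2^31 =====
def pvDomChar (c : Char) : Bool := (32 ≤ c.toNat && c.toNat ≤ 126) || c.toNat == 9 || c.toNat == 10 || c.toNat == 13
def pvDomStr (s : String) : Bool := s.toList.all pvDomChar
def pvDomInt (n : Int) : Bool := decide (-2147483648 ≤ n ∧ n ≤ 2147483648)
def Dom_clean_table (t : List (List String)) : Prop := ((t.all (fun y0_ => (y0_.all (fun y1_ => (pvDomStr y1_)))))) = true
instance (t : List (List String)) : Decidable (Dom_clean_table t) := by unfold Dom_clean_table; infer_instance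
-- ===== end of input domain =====

-- B replaces A's four-scans-per-column / membership-filter scheme by ONE streaming row pass that
-- maintains four per-column boolean flag vectors and then rebuilds rows from the keep mask
-- (same return value, different algorithmic decomposition).

-- ===== PORT A =====
-- shared helper: recognizer for strings accepted by Python's float(); hand-ported, exact on the
-- printable-ASCII domain (checked against CPython's grammar: strip, sign, inf/nan, digits with
-- single underscores between digits, optional fraction and exponent)
def pvIsSpace (c : Char) : Bool := c == ' ' || c == '\t' || c == '\n' || c == '\r' || c.toNat == 11 || c.toNat == 12

def pvRunTail : List Char → List Char
  | [] => []
  | '_' :: c :: rest => if c.isDigit then pvRunTail rest else '_' :: c :: rest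
  | c :: rest => if c.isDigit then pvRunTail rest else c :: rest

def pvStartRun : List Char → Option (List Char)
  | c :: rest => if c.isDigit then some (pvRunTail rest) else none
  | [] => none

def pvExpBody (l : List Char) : Bool :=
  let l' := match l with | '+' :: r => r | '-' :: r => r | r => r
  match pvStartRun l' with
  | some [] => true
  | _ => false

def pvExpPart : List Char → Bool
  | [] => true
  | 'e' :: rest => pvExpBody rest
  | 'E' :: rest => pvExpBody rest
  | _ => false

def pvFracExp (l : List Char) (hasInt : Bool) : Bool :=
  match l with
  | '.' :: r2 =>
      match pvStartRun r2 with
      | some r3 => pvExpPart r3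
      | none => hasInt && pvExpPart r2
  | _ => hasInt && pvExpPart l

def pvFloatOk (s : String) : Bool :=
  let l := ((s.toList.dropWhile pvIsSpace).reverse.dropWhile pvIsSpace).reverse
  let l := match l with | '+' :: r => r | '-' :: r => r | r => r
  let low := l.map Char.toLower
  (low == ['i','n','f'] || low == ['i','n','f','i','n','i','t','y'] || low == ['n','a','n'])
  || (match pvStartRun l with
      | some rest => pvFracExp rest true
      | none => pvFracExp l false)

-- Python: int(s) succeeds, or float(s) succeeds, else False
def isnonstring (s : String) : Bool := (PySem.Int.ofStr? s).isSome || pvFloatOk s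

-- Python row cell x[i] (total form with default ""; Pre_ keeps every access in range)
def pvCell (r : List String) (i : Int) : String := PySem.List.pyGetD r i ""

-- helper shared by both Pythons (Source B keeps A's addheader verbatim); t[0] as headD (Pre_: t ≠ [])
def addheader (t : List (List String)) : List (List String) :=
  if (t.headD []).any isnonstring then
    ((PySem.List.pyRange 0 ((t.headD []).length : Int) 1).map (fun x => "c" ++ PySem.Int.toStr x)) :: t
  else t

def clean_table (t : List (List String)) : List (List String) :=
  let t := addheader t
  let idxstolose := (PySem.List.pyRange 0 ((t.headD []).length : Int) 1).foldl (fun acc i =>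
    let acc := if (PySem.List.slice t (some 1) none).all
        (fun x => pvCell x i == pvCell (PySem.List.pyGetD t 1 []) i) then acc ++ [i] else acc
    let acc := if (PySem.List.enumerate (PySem.List.slice t (some 1) none) 0).all
        (fun p => pvCell p.2 i == PySem.Int.toStr p.1) then acc ++ [i] else acc
    let acc := if (PySem.List.enumerate (PySem.List.slice t (some 1) none) 0).all
        (fun p => pvCell p.2 i == PySem.Int.toStr (p.1 + 1)) then acc ++ [i] else acc
    if (PySem.List.enumerate t 0).all
        (fun p => pvCell p.2 i == PySem.Int.toStr p.1) then acc ++ [i] else acc)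
    ([] : List Int)
  let res := t.map (fun line =>
    (PySem.List.enumerate line 0).foldl (fun lineres p =>
      if !(idxstolose.contains p.1) then lineres ++ [p.2] else lineres) [])
  addheader res

-- ===== PORT B =====
-- B's cells = [row[i] for i in range(n)]
def pvCellsOf (n : Nat) (row : List String) : List String :=
  (PySem.List.pyRange 0 (n : Int) 1).map (fun i => PySem.List.pyGetD row i "")

-- B's loop body: state = (const, eq_j, eq_j1, eq_all, prev); Python's initial prev=None is only
-- read after being assigned (at j ≥ 2), so [] stands for the never-read initial value
def pvStepB (n : Nat) (st : List Bool × List Bool × List Bool × List Bool × List String)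
    (p : Int × List String) : List Bool × List Bool × List Bool × List Bool × List String :=
  let cells := pvCellsOf n p.2
  let eqAll := List.zipWith (fun b c => b && (c == PySem.Int.toStr p.1)) st.2.2.2.1 cells
  if 1 ≤ p.1 then
    let eqJ := List.zipWith (fun b c => b && (c == PySem.Int.toStr (p.1 - 1))) st.2.1 cells
    let eqJ1 := List.zipWith (fun b c => b && (c == PySem.Int.toStr p.1)) st.2.2.1 cells
    let cst := if 2 ≤ p.1 then
        List.zipWith (fun (q : Bool × String) pr => q.1 && (q.2 == pr)) (st.1.zip cells) st.2.2.2.2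
      else st.1
    (cst, eqJ, eqJ1, eqAll, cells)
  else (st.1, st.2.1, st.2.2.1, eqAll, st.2.2.2.2)

def clean_table_alt (t : List (List String)) : List (List String) :=
  let t := addheader t
  let n := (t.headD []).length
  let fin := (PySem.List.enumerate t 0).foldl (pvStepB n)
      (List.replicate n true, List.replicate n true, List.replicate n true, List.replicate n true,
        ([] : List String))
  let keep := ((fin.1.zip fin.2.1).zip (fin.2.2.1.zip fin.2.2.2.1)).map
      (fun q => !(q.1.1 || q.1.2 || q.2.1 || q.2.2))
  let res := t.map (fun row =>
    ((PySem.List.enumerate row 0).filter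
        (fun p => decide ((n : Int) ≤ p.1) || PySem.List.pyGetD keep p.1 false)).map (·.2))
  addheader res

-- ===== PRECONDITION & SPEC =====
-- Pre_ excludes exactly the inputs where the Python A raises IndexError: the empty table
-- (addheader reads t[0]) and tables with a row shorter than the first row (x[i] out of range).
def Pre_clean_table (t : List (List String)) : Prop :=
  t ≠ [] ∧ ∀ r ∈ t, (t.headD []).length ≤ r.length
instance (t : List (List String)) : Decidable (Pre_clean_table t) := by unfold Pre_clean_table; infer_instance

def pvWitness_clean_table : List (List String) := [["name", "val"], ["a", "7"], ["b", "7"]]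

def Spec_clean_table (t : List (List String)) (out : List (List String)) : Prop := out = clean_table_alt t
instance (t : List (List String)) (out : List (List String)) : Decidable (Spec_clean_table t out) := by unfold Spec_clean_table; infer_instance

-- ===== CLAIM (what is proved, stated in full; the proofs are below) =====
def Claim_equal_clean_table : Prop := ∀ (t : List (List String)), Dom_clean_table t → Pre_clean_table t → Spec_clean_table t (clean_table t)

-- ===== LEMMAS AND PROOFS =====

-- A's four drop conditions at index i, as one Bool
def pvDropA (t2 : List (List String)) (i : Int) : Bool :=
  ((PySem.List.slice t2 (some 1) none).all
      (fun x => pvCell x i == pvCell (PySem.List.pyGetD t2 1 []) i))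
  || ((PySem.List.enumerate (PySem.List.slice t2 (some 1) none) 0).all
      (fun p => pvCell p.2 i == PySem.Int.toStr p.1))
  || ((PySem.List.enumerate (PySem.List.slice t2 (some 1) none) 0).all
      (fun p => pvCell p.2 i == PySem.Int.toStr (p.1 + 1)))
  || ((PySem.List.enumerate t2 0).all
      (fun p => pvCell p.2 i == PySem.Int.toStr p.1))

-- A's loop body
def pvStepA (t2 : List (List String)) (acc : List Int) (i : Int) : List Int :=
  let acc := if (PySem.List.slice t2 (some 1) none).all
      (fun x => pvCell x i == pvCell (PySem.List.pyGetD t2 1 []) i) then acc ++ [i] else acc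
  let acc := if (PySem.List.enumerate (PySem.List.slice t2 (some 1) none) 0).all
      (fun p => pvCell p.2 i == PySem.Int.toStr p.1) then acc ++ [i] else acc
  let acc := if (PySem.List.enumerate (PySem.List.slice t2 (some 1) none) 0).all
      (fun p => pvCell p.2 i == PySem.Int.toStr (p.1 + 1)) then acc ++ [i] else acc
  if (PySem.List.enumerate t2 0).all
      (fun p => pvCell p.2 i == PySem.Int.toStr p.1) then acc ++ [i] else acc

lemma clean_table_eq_staged (t : List (List String)) :
    clean_table t =
      addheader ((addheader t).map (fun line =>
        (PySem.List.enumerate line 0).foldl (fun lineres p =>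
          if !((((PySem.List.pyRange 0 (((addheader t).headD []).length : Int) 1).foldl (pvStepA (addheader t)) []).contains p.1))
          then lineres ++ [p.2] else lineres) [])) := rfl

lemma mem_step_generic (c1 c2 c3 c4 : Bool) (acc : List Int) (j i : Int) :
    i ∈ (let a1 := if c1 then acc ++ [j] else acc
         let a2 := if c2 then a1 ++ [j] else a1
         let a3 := if c3 then a2 ++ [j] else a2
         if c4 then a3 ++ [j] else a3)
      ↔ i ∈ acc ∨ (i = j ∧ (c1 || c2 || c3 || c4)) := by
  cases c1 <;> cases c2 <;> cases c3 <;> cases c4 <;> simp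

lemma mem_pvStepA (t2 : List (List String)) (acc : List Int) (j i : Int) :
    i ∈ pvStepA t2 acc j ↔ i ∈ acc ∨ (i = j ∧ pvDropA t2 j) := by
  unfold pvStepA pvDropA
  exact mem_step_generic _ _ _ _ acc j i

lemma mem_foldl_pvStepA (t2 : List (List String)) (l : List Int) (acc : List Int) (i : Int) :
    i ∈ l.foldl (pvStepA t2) acc ↔ i ∈ acc ∨ (i ∈ l ∧ pvDropA t2 i) := by
  induction l generalizing acc with
  | nil => simp
  | cons j l ih =>
    simp only [List.foldl_cons, ih, mem_pvStepA, List.mem_cons]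
    constructor
    · rintro ((h | ⟨rfl, hd⟩) | ⟨hl, hd⟩) <;> tauto
    · rintro (h | ⟨(rfl | hl), hd⟩) <;> tauto

lemma contains_idx (t2 : List (List String)) (n : Nat) (i : Int) :
    (((PySem.List.pyRange 0 (n : Int) 1).foldl (pvStepA t2) []).contains i)
      = (decide (0 ≤ i ∧ i < (n : Int)) && pvDropA t2 i) := by
  rcases h : (((PySem.List.pyRange 0 (n : Int) 1).foldl (pvStepA t2) []).contains i) with _ | _
  · symm
    rw [Bool.eq_false_iff] at h ⊢
    intro hc
    apply h
    simp only [List.contains_eq_mem, decide_eq_true_eq, Bool.and_eq_true, decide_eq_true_eq] at hc ⊢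
    rw [mem_foldl_pvStepA]
    refine Or.inr ⟨?_, hc.2⟩
    rw [PySem.List.mem_pyRange_one]
    omega
  · symm
    simp only [List.contains_eq_mem, decide_eq_true_eq] at h
    rw [mem_foldl_pvStepA] at h
    rcases h with h | ⟨hm, hd⟩
    · simp at h
    · rw [PySem.List.mem_pyRange_one] at hm
      simp [hd]
      omega

-- A's per-row filter in canonical form
lemma row_eq (t2 : List (List String)) (n : Nat) (line : List String) (hlen : n ≤ line.length) :
    ((PySem.List.enumerate line 0).foldl (fun lineres p =>
        if !((((PySem.List.pyRange 0 (n : Int) 1).foldl (pvStepA t2) []).contains p.1)) then lineres ++ [p.2] else lineres) [])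
      = ((PySem.List.pyRange 0 (n : Int) 1).filter (fun i => !(pvDropA t2 i))).map (fun i => pvCell line i)
        ++ line.drop n := by
  rw [PySem.List.foldl_append_if, List.nil_append]
  conv_lhs => rw [show line = line.take n ++ line.drop n from (List.take_append_drop n line).symm]
  rw [PySem.List.enumerate_append, List.filter_append, List.map_append]
  have htk : (line.take n).length = n := by simp [hlen]
  congr 1
  · have hlen2 : PySem.List.len (line.take n) = (n : Int) := by simp [PySem.List.len_eq, htk]
    rw [PySem.List.enumerate_eq_map_pyRange (d := ""), hlen2]
    rw [List.filter_map, List.map_map]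
    refine Eq.trans (b := ((PySem.List.pyRange 0 (n : Int) 1).filter (fun i => !(pvDropA t2 i))).map (fun j => PySem.List.pyGetD (line.take n) j "")) ?_ ?_
    · rw [List.filter_congr (fun j hj => ?_)]
      · exact List.map_congr_left (fun j _ => rfl)
      · rw [PySem.List.mem_pyRange_one] at hj
        simp only [Function.comp_def]
        rw [contains_idx]
        simp [hj.1, hj.2]
    · apply List.map_congr_left
      intro j hj
      have hjr := (List.mem_filter.mp hj).1
      rw [PySem.List.mem_pyRange_one] at hjr
      have hj0 : 0 ≤ j := hjr.1
      have hjn : j.toNat < n := by omega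
      rw [PySem.List.pyGetD_eq_getElem _ _ hj0 (by rw [htk]; omega),
          pvCell, PySem.List.pyGetD_eq_getElem _ _ hj0 (by omega)]
      exact List.getElem_take
  · rw [List.filter_eq_self.mpr, PySem.List.map_snd_enumerate]
    intro p hp
    obtain ⟨k, hk, rfl⟩ := (PySem.List.mem_enumerate_iff _ _ _).mp hp
    rw [contains_idx]
    simp
    exact Or.inl (Or.inr (by omega))

-- ---- B-side lemmas ----

lemma length_pvCellsOf (n : Nat) (row : List String) : (pvCellsOf n row).length = n := by
  simp [pvCellsOf, PySem.List.length_pyRange_one]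

lemma getElem_pvCellsOf (n : Nat) (row : List String) (k : Nat) (hk : k < n) :
    (pvCellsOf n row)[k]'(by rw [length_pvCellsOf]; exact hk) = pvCell row (k : Int) := by
  simp [pvCellsOf, PySem.List.getElem_pyRange_one, pvCell]

-- enumerate at a shifted start
lemma enumerate_shift (xs : List (List String)) (s : Int) :
    PySem.List.enumerate xs (s + 1) = (PySem.List.enumerate xs s).map (fun p => (p.1 + 1, p.2)) := by
  induction xs generalizing s with
  | nil => simp [PySem.List.enumerate_nil]
  | cons x xs ih =>
    rw [PySem.List.enumerate_cons, PySem.List.enumerate_cons, List.map_cons]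
    rw [show s + 1 + 1 = (s + 1) + 1 by ring, ih (s + 1)]

-- projection: the eq_all component of the fold
lemma foldB_proj_eqAll (n : Nat) (rows : List (Int × List String))
    (st : List Bool × List Bool × List Bool × List Bool × List String) :
    (rows.foldl (pvStepB n) st).2.2.2.1
      = rows.foldl (fun e p => List.zipWith (fun b c => b && (c == PySem.Int.toStr p.1)) e (pvCellsOf n p.2)) st.2.2.2.1 := by
  induction rows generalizing st with
  | nil => rfl
  | cons p rows ih =>
    rw [List.foldl_cons, List.foldl_cons, ih]
    unfold pvStepB
    split_ifs <;> rfl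

-- projection: eq_j, when every processed index is ≥ 1
lemma foldB_proj_eqJ (n : Nat) (rows : List (Int × List String))
    (st : List Bool × List Bool × List Bool × List Bool × List String)
    (h : ∀ p ∈ rows, 1 ≤ p.1) :
    (rows.foldl (pvStepB n) st).2.1
      = rows.foldl (fun e p => List.zipWith (fun b c => b && (c == PySem.Int.toStr (p.1 - 1))) e (pvCellsOf n p.2)) st.2.1 := by
  induction rows generalizing st with
  | nil => rfl
  | cons p rows ih =>
    have hp1 : 1 ≤ p.1 := h p (by simp)
    rw [List.foldl_cons, List.foldl_cons, ih _ (fun q hq => h q (List.mem_cons_of_mem _ hq))]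
    congr 1
    unfold pvStepB
    rw [if_pos hp1]

-- projection: eq_j1, when every processed index is ≥ 1
lemma foldB_proj_eqJ1 (n : Nat) (rows : List (Int × List String))
    (st : List Bool × List Bool × List Bool × List Bool × List String)
    (h : ∀ p ∈ rows, 1 ≤ p.1) :
    (rows.foldl (pvStepB n) st).2.2.1
      = rows.foldl (fun e p => List.zipWith (fun b c => b && (c == PySem.Int.toStr p.1)) e (pvCellsOf n p.2)) st.2.2.1 := by
  induction rows generalizing st with
  | nil => rfl
  | cons p rows ih =>
    have hp1 : 1 ≤ p.1 := h p (by simp)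
    rw [List.foldl_cons, List.foldl_cons, ih _ (fun q hq => h q (List.mem_cons_of_mem _ hq))]
    congr 1
    unfold pvStepB
    rw [if_pos hp1]

-- projection: the (const, prev) pair, when every processed index is ≥ 1
lemma foldB_proj_const (n : Nat) (rows : List (Int × List String))
    (st : List Bool × List Bool × List Bool × List Bool × List String)
    (h : ∀ p ∈ rows, 1 ≤ p.1) :
    ((rows.foldl (pvStepB n) st).1, (rows.foldl (pvStepB n) st).2.2.2.2)
      = rows.foldl (fun cp p =>
          ((if 2 ≤ p.1 then
              List.zipWith (fun (q : Bool × String) pr => q.1 && (q.2 == pr)) (cp.1.zip (pvCellsOf n p.2)) cp.2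
            else cp.1), pvCellsOf n p.2)) (st.1, st.2.2.2.2) := by
  induction rows generalizing st with
  | nil => rfl
  | cons p rows ih =>
    have hp1 : 1 ≤ p.1 := h p (by simp)
    rw [List.foldl_cons, List.foldl_cons, ih _ (fun q hq => h q (List.mem_cons_of_mem _ hq))]
    congr 1
    unfold pvStepB
    rw [if_pos hp1]

-- generic elementwise characterisation of the zipWith-and folds
lemma foldl_zipWith_all (n : Nat) (g : Int × List String → String → Bool)
    (rows : List (Int × List String)) (e : List Bool) (he : e.length = n) :
    (rows.foldl (fun e p => List.zipWith (fun b c => b && g p c) e (pvCellsOf n p.2)) e).length = n ∧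
    ∀ k < n, (rows.foldl (fun e p => List.zipWith (fun b c => b && g p c) e (pvCellsOf n p.2)) e).getD k false
        = (e.getD k false && rows.all (fun p => g p (pvCell p.2 (k : Int)))) := by
  induction rows generalizing e with
  | nil => exact ⟨he, fun k hk => by simp⟩
  | cons p rows ih =>
    have hlen' : (List.zipWith (fun b c => b && g p c) e (pvCellsOf n p.2)).length = n := by
      simp [List.length_zipWith, he, length_pvCellsOf]
    obtain ⟨h1, h2⟩ := ih _ hlen'
    refine ⟨h1, fun k hk => ?_⟩
    rw [List.foldl_cons, h2 k hk]
    rw [List.getD_eq_getElem _ _ (by omega : k < (List.zipWith (fun b c => b && g p c) e (pvCellsOf n p.2)).length),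
        List.getElem_zipWith, List.getD_eq_getElem _ _ (by omega : k < e.length),
        getElem_pvCellsOf n p.2 k hk, List.all_cons, Bool.and_assoc]

-- chain-equality along a column equals all-equal-to-the-anchor
def pvChainCol (c : String) (l : List (List String)) (i : Int) : Bool :=
  match l with
  | [] => true
  | r :: rest => (pvCell r i == c) && pvChainCol (pvCell r i) rest i

lemma pvChainCol_eq_all (c : String) (l : List (List String)) (i : Int) :
    pvChainCol c l i = l.all (fun x => pvCell x i == c) := by
  induction l generalizing c with
  | nil => rfl
  | cons r rest ih =>
    simp only [pvChainCol, List.all_cons, ih]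
    rcases h : (pvCell r i == c) with _ | _
    · simp
    · have heq : pvCell r i = c := by simpa using h
      rw [heq]

-- the const/prev pair fold over indices ≥ 2 computes the chain along each column
lemma foldl_const_pair (n : Nat) (l : List (List String)) (s : Int) (hs : 2 ≤ s)
    (cst : List Bool) (hc : cst.length = n) (prevrow : List String) :
    ((PySem.List.enumerate l s).foldl (fun cp p =>
        ((if 2 ≤ p.1 then
            List.zipWith (fun (q : Bool × String) pr => q.1 && (q.2 == pr)) (cp.1.zip (pvCellsOf n p.2)) cp.2
          else cp.1), pvCellsOf n p.2)) (cst, pvCellsOf n prevrow)).1.length = n ∧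
    ∀ k < n, ((PySem.List.enumerate l s).foldl (fun cp p =>
        ((if 2 ≤ p.1 then
            List.zipWith (fun (q : Bool × String) pr => q.1 && (q.2 == pr)) (cp.1.zip (pvCellsOf n p.2)) cp.2
          else cp.1), pvCellsOf n p.2)) (cst, pvCellsOf n prevrow)).1.getD k false
      = (cst.getD k false && pvChainCol (pvCell prevrow (k : Int)) l (k : Int)) := by
  induction l generalizing s cst prevrow with
  | nil =>
    refine ⟨hc, fun k hk => ?_⟩
    simp [PySem.List.enumerate_nil, pvChainCol]
  | cons r rest ih =>
    rw [PySem.List.enumerate_cons, List.foldl_cons]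
    have hcst' : (List.zipWith (fun (q : Bool × String) pr => q.1 && (q.2 == pr))
        (cst.zip (pvCellsOf n r)) (pvCellsOf n prevrow)).length = n := by
      simp [List.length_zipWith, List.length_zip, hc, length_pvCellsOf]
    obtain ⟨h1, h2⟩ := ih (s + 1) (by omega)
      (List.zipWith (fun (q : Bool × String) pr => q.1 && (q.2 == pr))
        (cst.zip (pvCellsOf n r)) (pvCellsOf n prevrow)) hcst' r
    rw [if_pos hs]
    refine ⟨h1, fun k hk => ?_⟩
    rw [h2 k hk]
    rw [List.getD_eq_getElem _ _ (by omega : k < (List.zipWith (fun (q : Bool × String) pr => q.1 && (q.2 == pr)) (cst.zip (pvCellsOf n r)) (pvCellsOf n prevrow)).length),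
        List.getElem_zipWith, List.getElem_zip, List.getD_eq_getElem _ _ (by omega : k < cst.length)]
    rw [getElem_pvCellsOf n r k hk, getElem_pvCellsOf n prevrow k hk]
    simp [pvChainCol, Bool.and_assoc]

-- the j = 0 step only touches eq_all
lemma pvStepB_zero (n : Nat) (st : List Bool × List Bool × List Bool × List Bool × List String)
    (h0 : List String) :
    pvStepB n st (0, h0)
      = (st.1, st.2.1, st.2.2.1,
          List.zipWith (fun b c => b && (c == PySem.Int.toStr 0)) st.2.2.2.1 (pvCellsOf n h0),
          st.2.2.2.2) := by
  simp [pvStepB]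

-- every index produced by enumerate _ 1 is ≥ 1
lemma enumerate_one_ge (tl : List (List String)) :
    ∀ p ∈ PySem.List.enumerate tl 1, 1 ≤ p.1 := by
  intro p hp
  obtain ⟨k, hk, rfl⟩ := (PySem.List.mem_enumerate_iff _ _ _).mp hp
  simp

-- B's final state and keep mask (proof-only names; the port keeps its own lets)
def pvFinB (n : Nat) (t2 : List (List String)) :
    List Bool × List Bool × List Bool × List Bool × List String :=
  (PySem.List.enumerate t2 0).foldl (pvStepB n)
    (List.replicate n true, List.replicate n true, List.replicate n true, List.replicate n true,
      ([] : List String))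

def pvKeepB (n : Nat) (t2 : List (List String)) : List Bool :=
  (((pvFinB n t2).1.zip (pvFinB n t2).2.1).zip ((pvFinB n t2).2.2.1.zip (pvFinB n t2).2.2.2.1)).map
    (fun q => !(q.1.1 || q.1.2 || q.2.1 || q.2.2))

lemma clean_table_alt_eq_staged (t : List (List String)) :
    clean_table_alt t =
      addheader ((addheader t).map (fun row =>
        ((PySem.List.enumerate row 0).filter
            (fun p => decide (((((addheader t).headD []).length : Int)) ≤ p.1)
              || PySem.List.pyGetD (pvKeepB ((addheader t).headD []).length (addheader t)) p.1 false)).map (·.2))) := rfl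

-- the four final flag vectors, elementwise, against A's four conditions
lemma finB_eqAll (n : Nat) (t2 : List (List String)) :
    (pvFinB n t2).2.2.2.1.length = n ∧
    ∀ k < n, (pvFinB n t2).2.2.2.1.getD k false
      = (PySem.List.enumerate t2 0).all (fun p => pvCell p.2 (k : Int) == PySem.Int.toStr p.1) := by
  unfold pvFinB
  rw [foldB_proj_eqAll]
  dsimp only
  obtain ⟨h1, h2⟩ := foldl_zipWith_all n (fun p c => c == PySem.Int.toStr p.1)
    (PySem.List.enumerate t2 0) (List.replicate n true) (by simp)
  refine ⟨h1, fun k hk => ?_⟩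
  rw [h2 k hk,
      List.getD_eq_getElem _ _ (show k < (List.replicate n true).length by simpa using hk),
      List.getElem_replicate, Bool.true_and]

lemma finB_eqJ (n : Nat) (h0 : List String) (tl : List (List String)) :
    (pvFinB n (h0 :: tl)).2.1.length = n ∧
    ∀ k < n, (pvFinB n (h0 :: tl)).2.1.getD k false
      = (PySem.List.enumerate tl 0).all (fun p => pvCell p.2 (k : Int) == PySem.Int.toStr p.1) := by
  unfold pvFinB
  rw [PySem.List.enumerate_cons, List.foldl_cons, pvStepB_zero]
  simp only [zero_add]
  rw [foldB_proj_eqJ n _ _ (enumerate_one_ge tl)]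
  dsimp only
  obtain ⟨h1, h2⟩ := foldl_zipWith_all n (fun p c => c == PySem.Int.toStr (p.1 - 1))
    (PySem.List.enumerate tl 1) (List.replicate n true) (by simp)
  refine ⟨h1, fun k hk => ?_⟩
  rw [h2 k hk,
      List.getD_eq_getElem _ _ (show k < (List.replicate n true).length by simpa using hk),
      List.getElem_replicate, Bool.true_and,
      show (1 : Int) = 0 + 1 from rfl, enumerate_shift, List.all_map]
  simp [Function.comp_def]

lemma finB_eqJ1 (n : Nat) (h0 : List String) (tl : List (List String)) :
    (pvFinB n (h0 :: tl)).2.2.1.length = n ∧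
    ∀ k < n, (pvFinB n (h0 :: tl)).2.2.1.getD k false
      = (PySem.List.enumerate tl 0).all (fun p => pvCell p.2 (k : Int) == PySem.Int.toStr (p.1 + 1)) := by
  unfold pvFinB
  rw [PySem.List.enumerate_cons, List.foldl_cons, pvStepB_zero]
  simp only [zero_add]
  rw [foldB_proj_eqJ1 n _ _ (enumerate_one_ge tl)]
  dsimp only
  obtain ⟨h1, h2⟩ := foldl_zipWith_all n (fun p c => c == PySem.Int.toStr p.1)
    (PySem.List.enumerate tl 1) (List.replicate n true) (by simp)
  refine ⟨h1, fun k hk => ?_⟩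
  rw [h2 k hk,
      List.getD_eq_getElem _ _ (show k < (List.replicate n true).length by simpa using hk),
      List.getElem_replicate, Bool.true_and,
      show (1 : Int) = 0 + 1 from rfl, enumerate_shift, List.all_map]
  simp [Function.comp_def]

lemma finB_const (n : Nat) (h0 : List String) (tl : List (List String)) :
    (pvFinB n (h0 :: tl)).1.length = n ∧
    ∀ k < n, (pvFinB n (h0 :: tl)).1.getD k false
      = tl.all (fun x => pvCell x (k : Int) == pvCell (PySem.List.pyGetD (h0 :: tl) 1 []) (k : Int)) := by
  unfold pvFinB
  rw [PySem.List.enumerate_cons, List.foldl_cons, pvStepB_zero]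
  simp only [zero_add]
  have hpair := foldB_proj_const n (PySem.List.enumerate tl 1)
    (List.replicate n true, List.replicate n true, List.replicate n true,
      List.zipWith (fun b c => b && (c == PySem.Int.toStr 0)) (List.replicate n true) (pvCellsOf n h0),
      ([] : List String)) (enumerate_one_ge tl)
  have hfst := congrArg Prod.fst hpair
  dsimp only at hfst
  rw [hfst]
  cases tl with
  | nil =>
    refine ⟨by simp [PySem.List.enumerate_nil], fun k hk => ?_⟩
    rw [PySem.List.enumerate_nil, List.foldl_nil,
        List.getD_eq_getElem _ _ (show k < (List.replicate n true).length by simpa using hk),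
        List.getElem_replicate]
    rfl
  | cons r1 rest =>
    rw [PySem.List.enumerate_cons, List.foldl_cons]
    rw [if_neg (by omega : ¬ (2 : Int) ≤ 1)]
    dsimp only
    simp only [show (1 : Int) + 1 = 2 from rfl]
    obtain ⟨h1, h2⟩ := foldl_const_pair n rest 2 (by omega) (List.replicate n true) (by simp) r1
    refine ⟨h1, fun k hk => ?_⟩
    rw [h2 k hk, pvChainCol_eq_all,
        List.getD_eq_getElem _ _ (show k < (List.replicate n true).length by simpa using hk),
        List.getElem_replicate, Bool.true_and]
    have hr1 : PySem.List.pyGetD (h0 :: r1 :: rest) 1 ([] : List String) = r1 := by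
      simp [PySem.List.pyGetD]
    rw [hr1, List.all_cons]
    simp

-- the keep mask is exactly the negation of A's drop predicate over the index range
lemma keep_eq_mask (n : Nat) (t2 : List (List String)) (h : t2 ≠ []) :
    pvKeepB n t2 = (PySem.List.pyRange 0 (n : Int) 1).map (fun i => !(pvDropA t2 i)) := by
  obtain ⟨h0, tl, rfl⟩ : ∃ h0 tl, t2 = h0 :: tl := by
    cases t2 with
    | nil => exact absurd rfl h
    | cons a b => exact ⟨a, b, rfl⟩
  obtain ⟨lc, hc⟩ := finB_const n h0 tl
  obtain ⟨lj, hj⟩ := finB_eqJ n h0 tl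
  obtain ⟨lj1, hj1⟩ := finB_eqJ1 n h0 tl
  obtain ⟨la, ha⟩ := finB_eqAll n (h0 :: tl)
  apply List.ext_getElem
  · simp [pvKeepB, List.length_zip, lc, lj, lj1, la, PySem.List.length_pyRange_one]
  · intro k hk1 hk2
    have hkn : k < n := by
      simpa [pvKeepB, List.length_zip, lc, lj, lj1, la] using hk1
    simp only [pvKeepB, List.getElem_map, List.getElem_zip, PySem.List.getElem_pyRange_one]
    have ec := hc k hkn; have ej := hj k hkn; have ej1 := hj1 k hkn; have ea := ha k hkn
    rw [List.getD_eq_getElem _ _ (by omega : k < (pvFinB n (h0 :: tl)).1.length)] at ec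
    rw [List.getD_eq_getElem _ _ (by omega : k < (pvFinB n (h0 :: tl)).2.1.length)] at ej
    rw [List.getD_eq_getElem _ _ (by omega : k < (pvFinB n (h0 :: tl)).2.2.1.length)] at ej1
    rw [List.getD_eq_getElem _ _ (by omega : k < (pvFinB n (h0 :: tl)).2.2.2.1.length)] at ea
    rw [ec, ej, ej1, ea]
    unfold pvDropA
    rw [PySem.List.slice_from_one]
    simp only [List.tail_cons, zero_add]

-- B's per-row filter in the same canonical form as A's
lemma rowB_eq (n : Nat) (g : Int → Bool) (line : List String) (hlen : n ≤ line.length) :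
    ((PySem.List.enumerate line 0).filter
        (fun p => decide ((n : Int) ≤ p.1)
          || PySem.List.pyGetD ((PySem.List.pyRange 0 (n : Int) 1).map (fun i => g i)) p.1 false)).map (·.2)
      = ((PySem.List.pyRange 0 (n : Int) 1).filter g).map (fun i => pvCell line i)
        ++ line.drop n := by
  conv_lhs => rw [show line = line.take n ++ line.drop n from (List.take_append_drop n line).symm]
  rw [PySem.List.enumerate_append, List.filter_append, List.map_append]
  have htk : (line.take n).length = n := by simp [hlen]
  congr 1
  · have hlen2 : PySem.List.len (line.take n) = (n : Int) := by simp [PySem.List.len_eq, htk]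
    rw [PySem.List.enumerate_eq_map_pyRange (d := ""), hlen2]
    rw [List.filter_map, List.map_map]
    refine Eq.trans (b := ((PySem.List.pyRange 0 (n : Int) 1).filter g).map (fun j => PySem.List.pyGetD (line.take n) j "")) ?_ ?_
    · rw [List.filter_congr (fun j hj => ?_)]
      · exact List.map_congr_left (fun j _ => rfl)
      · rw [PySem.List.mem_pyRange_one] at hj
        simp only [Function.comp_def]
        rw [PySem.List.pyGetD_map_pyRange_of_nonneg _ _ _ _ hj.1 hj.2]
        simp [show ¬ ((n : Int) ≤ j) by omega]
    · apply List.map_congr_left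
      intro j hj
      have hjr := (List.mem_filter.mp hj).1
      rw [PySem.List.mem_pyRange_one] at hjr
      have hj0 : 0 ≤ j := hjr.1
      have hjn : j.toNat < n := by omega
      rw [PySem.List.pyGetD_eq_getElem _ _ hj0 (by rw [htk]; omega),
          pvCell, PySem.List.pyGetD_eq_getElem _ _ hj0 (by omega)]
      exact List.getElem_take
  · rw [List.filter_eq_self.mpr, PySem.List.map_snd_enumerate]
    intro p hp
    obtain ⟨k, hk, rfl⟩ := (PySem.List.mem_enumerate_iff _ _ _).mp hp
    simp [htk]

lemma addheader_ne_nil (t : List (List String)) (h : t ≠ []) : addheader t ≠ [] := by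
  unfold addheader; split_ifs <;> simp_all

lemma addheader_head_len (t : List (List String)) :
    ((addheader t).headD []).length = (t.headD []).length := by
  unfold addheader
  split_ifs with h
  · simp [PySem.List.length_pyRange_one]
  · rfl

lemma addheader_row_len (t : List (List String)) (h : ∀ r ∈ t, (t.headD []).length ≤ r.length)
    (r : List String) (hr : r ∈ addheader t) : ((addheader t).headD []).length ≤ r.length := by
  rw [addheader_head_len]
  unfold addheader at hr
  split_ifs at hr with hh
  · rcases List.mem_cons.mp hr with rfl | hr
    · simp [PySem.List.length_pyRange_one]
    · exact h r hr
  · exact h r hr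

-- ===== VERDICT (by name: the statement is the Claim_ definition above) =====
theorem clean_table_spec : Claim_equal_clean_table := by
  intro t _ hpre
  show clean_table t = clean_table_alt t
  obtain ⟨hne, hrows⟩ := hpre
  rw [clean_table_eq_staged, clean_table_alt_eq_staged]
  have hne2 : addheader t ≠ [] := addheader_ne_nil t hne
  congr 1
  apply List.map_congr_left
  intro line hline
  rw [row_eq (addheader t) (((addheader t).headD []).length) line (addheader_row_len t hrows line hline)]
  rw [keep_eq_mask (((addheader t).headD []).length) (addheader t) hne2]
  rw [rowB_eq (((addheader t).headD []).length) (fun i => !(pvDropA (addheader t) i)) line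
      (addheader_row_len t hrows line hline)]
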